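-- pv_equiv track=rewrite | github.com/AndrewFesenko/GatorChef | server/app/services/canonical_identifier/expand.py | _build_phrase_lookup
-- ===== SOURCE A (Python) =====
-- def _build_phrase_lookup(table: dict[str, str]) -> tuple[dict[int, dict[str, str]], int]:
--     """Group multi-word keys by word count for greedy left-to-right scanning."""
--     by_length: dict[int, dict[str, str]] = {}
--     max_len = 1
--     for key, value in table.items():
--         n = len(key.split())
--         by_length.setdefault(n, {})[key] = value
--         if n > max_len:
--             max_len = n
--     return by_length, max_len
-- ===== SOURCE B (Python) =====
-- def _build_phrase_lookup(table):
--     """Group multi-word keys by word count for greedy left-to-right scanning."""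
--     ns = [len(k.split()) for k in table]
--     order = list(dict.fromkeys(ns))
--     by_length = {n: {k: v for k, v in table.items() if len(k.split()) == n} for n in order}
--     max_len = max([1, *ns])
--     return by_length, max_len
-- ===== Notes on version B (the rewrite author's own statement) =====
-- stated objective: alternative
-- what changed: Replaces incremental dict-of-dicts bucketing with a declarative pass: compute all word counts, take their first-occurrence distinct values, and build each bucket by a filtering comprehension; max_len becomes max([1,*counts]) instead of a running comparison. Pre_ excludes association lists with duplicate keys, which cannot arise from the Python dict argument.
import Mathlib
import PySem

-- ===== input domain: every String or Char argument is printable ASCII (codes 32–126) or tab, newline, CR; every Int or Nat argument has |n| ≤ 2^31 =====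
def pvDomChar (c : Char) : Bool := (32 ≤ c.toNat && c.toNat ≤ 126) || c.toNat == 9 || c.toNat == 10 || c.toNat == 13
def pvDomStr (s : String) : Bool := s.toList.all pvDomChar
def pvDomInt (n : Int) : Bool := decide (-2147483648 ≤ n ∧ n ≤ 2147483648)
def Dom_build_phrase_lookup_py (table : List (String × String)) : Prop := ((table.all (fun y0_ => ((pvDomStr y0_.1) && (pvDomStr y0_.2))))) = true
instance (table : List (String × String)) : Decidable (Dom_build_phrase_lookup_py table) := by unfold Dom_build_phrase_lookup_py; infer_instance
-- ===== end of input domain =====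

-- B builds the buckets declaratively (distinct word counts + a filter per count) instead of A's
-- incremental dict-of-dicts bucketing; alternative decomposition, same results.

-- ===== PORT A =====
def build_phrase_lookup_py (table : List (String × String)) : (List (Int × List (String × String))) × Int :=
  -- by_length: dict[int, dict[str,str]]; setdefault(n, {})[key] = value is Dict.modify n {} (insert key value)
  let st := table.foldl
    (fun (st : PySem.Dict Int (PySem.Dict String String) × Int) kv =>
      let n : Int := ((PySem.Str.split₀ kv.1).length : Int)
      (st.1.modify n PySem.Dict.empty (fun inner => inner.insert kv.1 kv.2),
       if n > st.2 then n else st.2))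
    (PySem.Dict.empty, 1)
  (st.1.items.map (fun p => (p.1, p.2.items)), st.2)

-- ===== PORT B =====
def build_phrase_lookup_py_alt (table : List (String × String)) : (List (Int × List (String × String))) × Int :=
  let ns : List Int := table.map (fun kv => ((PySem.Str.split₀ kv.1).length : Int))
  let order := PySem.List.dedup ns
  let by_length := order.map (fun n =>
    (n, table.filter (fun kv => ((PySem.Str.split₀ kv.1).length : Int) == n)))
  (by_length, ns.foldl max 1)

-- ===== PRECONDITION & SPEC =====
-- Pre_ excludes association lists with duplicate keys: the Python argument is a dict, whose keys
-- are necessarily distinct, so such lists do not represent any actual input of A.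
def Pre_build_phrase_lookup_py (table : List (String × String)) : Prop :=
  (table.map Prod.fst).Nodup
instance (table : List (String × String)) : Decidable (Pre_build_phrase_lookup_py table) := by
  unfold Pre_build_phrase_lookup_py; infer_instance

def pvWitness_build_phrase_lookup_py : (List (String × String)) :=
  [("a b", "x"), ("c", "y"), ("d e", "z")]

def Spec_build_phrase_lookup_py (table : List (String × String)) (out : (List (Int × List (String × String))) × Int) : Prop := out = build_phrase_lookup_py_alt table
instance (table : List (String × String)) (out : (List (Int × List (String × String))) × Int) : Decidable (Spec_build_phrase_lookup_py table out) := by unfold Spec_build_phrase_lookup_py; infer_instance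

-- ===== CLAIM (what is proved, stated in full; the proofs are below) =====
def Claim_equal_build_phrase_lookup_py : Prop := ∀ (table : List (String × String)), Dom_build_phrase_lookup_py table → Pre_build_phrase_lookup_py table → Spec_build_phrase_lookup_py table (build_phrase_lookup_py table)

-- ===== LEMMAS AND PROOFS =====

-- A's loop threads a pair whose components evolve independently: it splits into two foldls.
theorem pv_split (t : List (String × String)) (d : PySem.Dict Int (PySem.Dict String String)) (m : Int) :
    t.foldl
      (fun (st : PySem.Dict Int (PySem.Dict String String) × Int) kv =>
        (st.1.modify ((PySem.Str.split₀ kv.1).length : Int) PySem.Dict.empty (fun inner => inner.insert kv.1 kv.2),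
         if ((PySem.Str.split₀ kv.1).length : Int) > st.2 then ((PySem.Str.split₀ kv.1).length : Int) else st.2))
      (d, m)
    = (t.foldl (fun d kv => d.modify ((PySem.Str.split₀ kv.1).length : Int) PySem.Dict.empty (fun inner => inner.insert kv.1 kv.2)) d,
       t.foldl (fun m kv => if ((PySem.Str.split₀ kv.1).length : Int) > m then ((PySem.Str.split₀ kv.1).length : Int) else m) m) := by
  induction t generalizing d m with
  | nil => rfl
  | cons x t ih => simpa using ih _ _

-- The running "if n > m then n else m" loop is the running max.
theorem pv_max_fold (t : List (String × String)) (m : Int) :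
    t.foldl (fun m kv => if ((PySem.Str.split₀ kv.1).length : Int) > m then ((PySem.Str.split₀ kv.1).length : Int) else m) m
      = (t.map (fun kv => ((PySem.Str.split₀ kv.1).length : Int))).foldl max m := by
  induction t generalizing m with
  | nil => rfl
  | cons x t ih =>
    simp only [List.foldl_cons, List.map_cons]
    rw [ih]
    congr 1
    omega

-- Lookup in A's bucket dict after the loop = fold of the matching entries.
theorem pv_getD_fold (t : List (String × String)) (d : PySem.Dict Int (PySem.Dict String String)) (n : Int) :
    ((t.foldl (fun d kv => d.modify ((PySem.Str.split₀ kv.1).length : Int) PySem.Dict.empty (fun inner => inner.insert kv.1 kv.2)) d).getD n PySem.Dict.empty)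
      = (t.filter (fun kv => ((PySem.Str.split₀ kv.1).length : Int) == n)).foldl (fun i kv => i.insert kv.1 kv.2) (d.getD n PySem.Dict.empty) := by
  induction t generalizing d with
  | nil => rfl
  | cons x t ih =>
    simp only [List.foldl_cons, List.filter_cons]
    rw [ih]
    by_cases h : ((PySem.Str.split₀ x.1).length : Int) = n
    · simp [h]
    · simp [h, PySem.Dict.getD_modify, Ne.symm h]

-- Keys of A's bucket dict after the loop, in insertion order.
theorem pv_keys_fold (t : List (String × String)) (d : PySem.Dict Int (PySem.Dict String String)) :
    (t.foldl (fun d kv => d.modify ((PySem.Str.split₀ kv.1).length : Int) PySem.Dict.empty (fun inner => inner.insert kv.1 kv.2)) d).keys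
      = PySem.Set.update d.keys (t.map (fun kv => ((PySem.Str.split₀ kv.1).length : Int))) := by
  induction t generalizing d with
  | nil => rfl
  | cons x t ih =>
    simp only [List.foldl_cons, List.map_cons]
    rw [ih, PySem.Dict.keys_modify]
    have hk : ∀ (dd : PySem.Dict Int (PySem.Dict String String)) (k : Int) (v : PySem.Dict String String),
        (dd.insert k v).keys = PySem.Set.add dd.keys k := by
      intro dd k v
      by_cases hc : dd.contains k = true
      · rw [PySem.Dict.keys_insert_of_contains dd v hc]
        rw [PySem.Dict.contains_eq_decide_mem_keys] at hc
        simp at hc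
        simp [PySem.Set.add, PySem.Set.contains, hc]
      · rw [PySem.Dict.keys_insert_of_not_contains dd v (by simpa using hc)]
        rw [PySem.Dict.contains_eq_decide_mem_keys] at hc
        simp at hc
        simp [PySem.Set.add, PySem.Set.contains, hc]
    rw [hk]
    simp [PySem.Set.update]

-- Inserting pairwise-distinct fresh keys into an empty dict just lists them.
theorem pv_items_fold_fresh (l : List (String × String)) (h : (l.map Prod.fst).Nodup) :
    ((l.foldl (fun i kv => i.insert kv.1 kv.2) (PySem.Dict.empty : PySem.Dict String String)).items) = l := by
  have := PySem.Dict.items_foldl_insert_fresh (l := l) (k := Prod.fst) (v := Prod.snd)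
    (d := (PySem.Dict.empty : PySem.Dict String String)) (by intro a _; simp [PySem.Dict.contains_empty]) h
  simpa using this

theorem build_phrase_lookup_py_spec : Claim_equal_build_phrase_lookup_py := by
  intro table _ hpre
  show build_phrase_lookup_py table = build_phrase_lookup_py_alt table
  simp only [build_phrase_lookup_py, build_phrase_lookup_py_alt]
  rw [pv_split]
  have hkeys := pv_keys_fold table PySem.Dict.empty
  rw [PySem.Dict.keys_empty, PySem.Set.update_nil_left] at hkeys
  have hnd : (table.foldl (fun d kv => d.modify ((PySem.Str.split₀ kv.1).length : Int) PySem.Dict.empty (fun inner => inner.insert kv.1 kv.2)) PySem.Dict.empty).keys.Nodup := by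
    rw [hkeys]; exact PySem.Set.nodup_ofList _
  rw [PySem.Dict.items_eq_map_keys _ hnd PySem.Dict.empty, hkeys,
      PySem.List.dedup_eq_ofList, pv_max_fold, List.map_map]
  refine congrArg₂ Prod.mk (List.map_congr_left ?_) rfl
  intro n _
  simp only [Function.comp_apply]
  rw [pv_getD_fold, PySem.Dict.getD_empty]
  refine congrArg (Prod.mk n) (pv_items_fold_fresh _ ?_)
  have hsub : (table.filter (fun kv => ((PySem.Str.split₀ kv.1).length : Int) == n)).map Prod.fst |>.Sublist (table.map Prod.fst) :=
    List.Sublist.map Prod.fst List.filter_sublist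
  exact hpre.sublist hsub
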